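-- pv_equiv track=rewrite | github.com/bouzidkobchi/Oops | 3 - Oops!/test.py | randomizer
-- ===== SOURCE A (Python) =====
-- def randomizer(text) :
--     """make the text randomized"""
--     text_list = [*text]
--
--     # randomize function :
--     _to = len(text_list)
--     _from = 1
--     for i in range(_to) :
--         for j in range(_from,_to,2) :
--             # swap :
--             t = text_list[j]
--             text_list[j] = text_list[j-1]
--             text_list[j-1] = t
--
--         _to -= 1
--         _from += 1
--
--     # joined string :
--     final_text = ''.join(text_list)
--
--     return final_text
-- ===== SOURCE B (Python) =====
-- def randomizer(text):
--     """make the text randomized"""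
--     chars = [*text]
--     return ''.join(chars[1::2] + chars[0::2])
-- ===== Notes on version B (the rewrite author's own statement) =====
-- stated objective: faster
-- what changed: Replaces the O(n^2) nested adjacent-swap simulation with the closed form it computes: the odd-indexed characters followed by the even-indexed ones, via two slices.
import Mathlib
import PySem

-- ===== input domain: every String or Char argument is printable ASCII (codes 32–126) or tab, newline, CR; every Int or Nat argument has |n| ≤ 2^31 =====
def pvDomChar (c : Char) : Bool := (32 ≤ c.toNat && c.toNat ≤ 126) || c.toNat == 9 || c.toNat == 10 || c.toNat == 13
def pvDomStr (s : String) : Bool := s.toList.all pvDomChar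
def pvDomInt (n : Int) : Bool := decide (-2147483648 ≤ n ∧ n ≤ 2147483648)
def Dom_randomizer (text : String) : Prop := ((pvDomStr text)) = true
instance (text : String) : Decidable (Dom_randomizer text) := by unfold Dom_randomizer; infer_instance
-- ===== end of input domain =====

-- B replaces A's O(n^2) nested adjacent-swap simulation by its closed form: the odd-indexed
-- characters followed by the even-indexed ones, taken with two extended slices (objective: faster).


-- ===== PORT A =====
-- one inner-loop body: t = l[j]; l[j] = l[j-1]; l[j-1] = t   (indices are always in range
-- when called by `randomizer`, so the `none` branches are unreachable)
def swapStep (l : List Char) (j : Int) : List Char :=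
  match PySem.List.pyGet? l j with
  | none => l
  | some t =>
    match PySem.List.pyGet? l (j - 1) with
    | none => l
    | some u => PySem.List.pySetD (PySem.List.pySetD l j u) (j - 1) t

-- the inner `for j in range(_from, _to, 2)` loop
def innerLoop (l : List Char) (f t : Int) : List Char :=
  (PySem.List.pyRange f t 2).foldl swapStep l

-- one outer-loop body on the state (text_list, _to, _from)
def outerStep (st : List Char × Int × Int) : List Char × Int × Int :=
  (innerLoop st.1 st.2.2 st.2.1, st.2.1 - 1, st.2.2 + 1)

def randomizer (text : String) : String :=
  let tl := text.toList
  let res := (PySem.List.pyRange 0 (tl.length : Int) 1).foldl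
    (fun st _i => outerStep st) (tl, (tl.length : Int), (1 : Int))
  String.ofList res.1

-- ===== PORT B =====
def randomizer_alt (text : String) : String :=
  let chars := text.toList
  String.ofList (((PySem.List.slice? chars (some 1) none 2).getD []) ++
                 ((PySem.List.slice? chars (some 0) none 2).getD []))

-- ===== PRECONDITION & SPEC =====
def Spec_randomizer (text : String) (out : String) : Prop := out = randomizer_alt text
instance (text : String) (out : String) : Decidable (Spec_randomizer text out) := by
  unfold Spec_randomizer; infer_instance

-- ===== CLAIM (what is proved, stated in full; the proofs are below) =====
def Claim_equal_randomizer : Prop := ∀ (text : String), Dom_randomizer text → Spec_randomizer text (randomizer text)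

-- ===== LEMMAS AND PROOFS =====

-- the even-indexed elements of a list (positions 0,2,4,…)
def ev : List Char → List Char
  | [] => []
  | [a] => [a]
  | a :: _ :: r => a :: ev r

-- the odd-indexed elements (positions 1,3,5,…)
def od (l : List Char) : List Char := ev l.tail

-- one inner pass with _from = 1: swap the pairs (0,1), (2,3), …
def swpass : List Char → List Char
  | a :: b :: r => b :: a :: swpass r
  | l => l

-- k outer rounds, expressed structurally: one pass, then recurse on the interior
def rounds : ℕ → List Char → List Char
  | 0, m => m
  | k + 1, m =>
    match swpass m with
    | a :: b :: r => a :: (rounds k ((b :: r).dropLast) ++ [(b :: r).getLast (by simp)])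
    | p => p

lemma ev_cons (a : Char) (d : List Char) : ev (a :: d) = a :: od d := by
  cases d <;> simp [ev, od]

lemma length_pass (l : List Char) : (swpass l).length = l.length := by
  induction l using swpass.induct <;> simp [swpass, *]

lemma pass_ne_nil {l : List Char} (h : l ≠ []) : swpass l ≠ [] := by
  intro hc
  have := length_pass l
  rw [hc] at this
  simpa [List.length_eq_zero_iff.mp this.symm] using h

lemma pyRange_two_nil {f t : Int} (h : t ≤ f) : PySem.List.pyRange f t 2 = [] := by
  rw [PySem.List.pyRange_of_pos f t (by norm_num)]
  simp [if_neg (by omega : ¬ f < t)]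

lemma pyRange_two_cons {f t : Int} (h : f < t) :
    PySem.List.pyRange f t 2 = f :: PySem.List.pyRange (f + 2) t 2 := by
  rw [PySem.List.pyRange_of_pos f t (by norm_num),
      PySem.List.pyRange_of_pos (f + 2) t (by norm_num)]
  have hc : ((t - f + 2 - 1) / 2).toNat =
      (if f + 2 < t then ((t - (f + 2) + 2 - 1) / 2).toNat else 0) + 1 := by
    split_ifs <;> omega
  rw [if_pos h, hc, List.range_succ_eq_map]
  simp only [List.map_cons, List.map_map, Nat.cast_zero, mul_zero, add_zero]
  congr 1
  apply List.map_congr_left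
  intro k _
  simp only [Function.comp_apply, Nat.succ_eq_add_one]
  push_cast
  ring

lemma swapStep_seg (x : List Char) (a b : Char) (y : List Char) :
    swapStep (x ++ a :: b :: y) ((x.length : Int) + 1) = x ++ b :: a :: y := by
  have h1 : ((x.length : Int) + 1) = ((x.length + 1 : ℕ) : Int) := by push_cast; ring
  have h2 : ((x.length : Int) + 1 - 1) = ((x.length : ℕ) : Int) := by push_cast; ring
  unfold swapStep
  rw [h2, h1, PySem.List.pyGet?_natCast, PySem.List.pyGet?_natCast]
  have hb : (x ++ a :: b :: y)[x.length + 1]? = some b := by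
    rw [List.getElem?_append_right (by omega)]
    simp
  have ha : (x ++ a :: b :: y)[x.length]? = some a := by
    rw [List.getElem?_append_right (by omega)]
    simp
  rw [hb, ha]
  simp only [PySem.List.pySetD_natCast]
  rw [List.set_append, if_neg (by omega), List.set_append, if_neg (by omega)]
  simp

lemma innerLoop_seg (m x y : List Char) :
    innerLoop (x ++ m ++ y) ((x.length : Int) + 1) ((x.length : Int) + m.length) =
      x ++ swpass m ++ y := by
  induction m using swpass.induct generalizing x with
  | case1 a b r ih =>
    unfold innerLoop
    rw [pyRange_two_cons (by simp only [List.length_cons]; push_cast; omega), List.foldl_cons]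
    have hswap : swapStep (x ++ (a :: b :: r) ++ y) ((x.length : Int) + 1)
        = (x ++ [b, a]) ++ r ++ y := by
      have := swapStep_seg x a b (r ++ y)
      simpa using this
    rw [hswap]
    have hx : ((x.length : Int) + 1 + 2) = (((x ++ [b, a]).length : Int) + 1) := by
      simp; push_cast; ring
    have ht : ((x.length : Int) + (a :: b :: r).length) =
        (((x ++ [b, a]).length : Int) + r.length) := by
      simp; push_cast; ring
    rw [hx, ht]
    have := ih (x ++ [b, a])
    unfold innerLoop at this
    rw [this]
    simp [swpass]
  | case2 l hl =>
    -- l has length ≤ 1: the range is empty and swpass is the identity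
    unfold innerLoop
    rw [pyRange_two_nil]
    · cases l with
      | nil => simp [swpass]
      | cons a r =>
        cases r with
        | nil => simp [swpass]
        | cons b r' => exact absurd rfl (hl a b r')
    · cases l with
      | nil => simp
      | cons a r =>
        cases r with
        | nil => simp
        | cons b r' => exact absurd rfl (hl a b r')

lemma outerStep_noop (k : ℕ) (l : List Char) (t f : Int) (h : t ≤ f) :
    (outerStep^[k] (l, t, f)).1 = l := by
  induction k generalizing t f with
  | zero => rfl
  | succ k ih =>
    rw [Function.iterate_succ_apply]
    have : outerStep (l, t, f) = (l, t - 1, f + 1) := by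
      simp [outerStep, innerLoop, pyRange_two_nil h]
    rw [this]
    exact ih _ _ (by omega)

lemma iterate_seg (k : ℕ) (m x y : List Char) :
    (outerStep^[k] (x ++ m ++ y, (x.length : Int) + m.length, (x.length : Int) + 1)).1 =
      x ++ rounds k m ++ y := by
  induction k generalizing m x y with
  | zero => simp [rounds]
  | succ k ih =>
    rw [Function.iterate_succ_apply]
    have hstep : outerStep (x ++ m ++ y, (x.length : Int) + m.length, (x.length : Int) + 1) =
        (x ++ swpass m ++ y, (x.length : Int) + m.length - 1, (x.length : Int) + 2) := by
      simp only [outerStep, innerLoop_seg, Prod.mk.injEq]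
      refine ⟨trivial, trivial, by ring⟩
    rw [hstep]
    match hp : swpass m with
    | [] =>
      have hm : m = [] := by
        have := length_pass m; rw [hp] at this; exact List.length_eq_zero_iff.mp this.symm
      rw [outerStep_noop k _ _ _ (by subst hm; simp; omega)]
      simp [rounds, hp, hm, swpass]
    | [a] =>
      have hm : m.length = 1 := by have := length_pass m; rw [hp] at this; simpa using this.symm
      rw [outerStep_noop k _ _ _ (by rw [hm]; push_cast; omega)]
      have hm' : m = [a] := by
        cases m with
        | nil => simp at hm
        | cons c r => cases r with
          | nil => simpa [swpass] using hp
          | cons d r' => simp at hm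
      simp [rounds, hp, hm', swpass]
    | a :: b :: r =>
      -- rewrite x ++ (a :: b :: r) ++ y as x' ++ m' ++ y' and apply the IH
      have hsplit : x ++ (a :: b :: r) ++ y =
          (x ++ [a]) ++ ((b :: r).dropLast) ++ ((b :: r).getLast (by simp) :: y) := by
        have h0 := List.dropLast_append_getLast (l := b :: r) (by simp)
        conv_lhs => rw [show (a :: b :: r : List Char) =
          a :: ((b :: r).dropLast ++ [(b :: r).getLast (by simp)]) by rw [h0]]
        simp
      have hlen : ((x.length : Int) + m.length - 1) =
          (((x ++ [a]).length : Int) + ((b :: r).dropLast).length) := by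
        have h1 : m.length = (a :: b :: r).length := by
          have := length_pass m; rw [hp] at this; exact this.symm
        simp [h1]; push_cast; ring
      have hf : ((x.length : Int) + 2) = (((x ++ [a]).length : Int) + 1) := by
        simp; push_cast; ring
      rw [hsplit, hlen, hf, ih]
      simp [rounds, hp]

lemma pass_dropLast_ev (r : List Char) : ev ((swpass r).dropLast) = od r := by
  induction r using swpass.induct with
  | case1 c d r' ih =>
    match hr : r' with
    | [] => simp [swpass, ev, od]
    | e :: r'' =>
      have hne : swpass (e :: r'') ≠ [] := pass_ne_nil (by simp)
      rw [show swpass (c :: d :: e :: r'') = d :: c :: swpass (e :: r'') from rfl]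
      rw [List.dropLast_cons_of_ne_nil (by simp [hne]), List.dropLast_cons_of_ne_nil hne]
      rw [show ev (d :: c :: (swpass (e :: r'')).dropLast) = d :: ev ((swpass (e :: r'')).dropLast) from rfl]
      rw [ih]
      simp [od, ev_cons]
  | case2 l hl =>
    cases l with
    | nil => simp [swpass, ev, od]
    | cons a r =>
      cases r with
      | nil => simp [swpass, ev, od]
      | cons b r' => exact absurd rfl (hl a b r')

lemma pass_dropLast_od (r : List Char) :
    od ((swpass r).dropLast) ++ (swpass r).getLast?.toList = ev r := by
  induction r using swpass.induct with
  | case1 c d r' ih =>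
    match hr : r' with
    | [] => simp [swpass, ev, od]
    | e :: r'' =>
      have hne : swpass (e :: r'') ≠ [] := pass_ne_nil (by simp)
      rw [show swpass (c :: d :: e :: r'') = d :: c :: swpass (e :: r'') from rfl]
      rw [List.dropLast_cons_of_ne_nil (by simp [hne]), List.dropLast_cons_of_ne_nil hne]
      rw [show od (d :: c :: (swpass (e :: r'')).dropLast) = c :: od ((swpass (e :: r'')).dropLast) by
        simp [od, ev_cons]]
      have hgl : (d :: c :: swpass (e :: r'')).getLast? = (swpass (e :: r'')).getLast? := by
        cases hq : swpass (e :: r'') with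
        | nil => exact absurd hq hne
        | cons w W' => simp
      rw [hgl, List.cons_append, ih]
      rfl
  | case2 l hl =>
    cases l with
    | nil => simp [swpass, ev, od]
    | cons a r =>
      cases r with
      | nil => simp [swpass, ev, od]
      | cons b r' => exact absurd rfl (hl a b r')

lemma rounds_nil (k : ℕ) : rounds k [] = [] := by
  cases k <;> simp [rounds, swpass]

lemma rounds_eq (k : ℕ) (m : List Char) (h : m.length ≤ k) : rounds k m = od m ++ ev m := by
  induction k generalizing m with
  | zero =>
    have : m = [] := by
      cases m with
      | nil => rfl
      | cons a r => simp at h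
    subst this; simp [rounds, od, ev]
  | succ k ih =>
    match hm : m with
    | [] => simp [rounds, swpass, od, ev]
    | [a] => simp [rounds, swpass, od, ev]
    | a :: b :: r =>
      rw [rounds]
      rw [show swpass (a :: b :: r) = b :: a :: swpass r from rfl]
      match hr : r with
      | [] => simp [rounds, swpass, od, ev, rounds_nil]
      | e :: r'' =>
        have hne : swpass (e :: r'') ≠ [] := pass_ne_nil (by simp)
        show b :: (rounds k ((a :: swpass (e :: r'')).dropLast) ++
            [(a :: swpass (e :: r'')).getLast (by simp)]) =
          od (a :: b :: e :: r'') ++ ev (a :: b :: e :: r'')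
        rw [List.dropLast_cons_of_ne_nil hne, List.getLast_cons hne]
        rw [ih (a :: (swpass (e :: r'')).dropLast) (by
          have h1 := length_pass (e :: r'')
          simp only [List.length_cons] at h
          simp only [List.length_cons, List.length_dropLast, h1, List.length_cons]
          omega)]
        rw [show od (a :: (swpass (e :: r'')).dropLast) = ev ((swpass (e :: r'')).dropLast) from rfl]
        rw [ev_cons, pass_dropLast_ev]
        rw [show od (a :: b :: e :: r'') = b :: od (e :: r'') by simp [od, ev_cons]]
        rw [show ev (a :: b :: e :: r'') = a :: ev (e :: r'') from rfl]
        rw [show [(swpass (e :: r'')).getLast hne] = (swpass (e :: r'')).getLast?.toList by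
          simp [List.getLast?_eq_getLast hne]]
        have hk2 := pass_dropLast_od (e :: r'')
        simp only [List.cons_append, List.append_assoc]
        rw [← hk2]

lemma foldl_const_iterate {α β : Type} (g : α → α) (init : α) (l : List β) :
    l.foldl (fun s _ => g s) init = g^[l.length] init := by
  induction l generalizing init with
  | nil => rfl
  | cons a l ih => simp [List.foldl_cons, ih, Function.iterate_succ_apply]

-- the two step-2 slices as filterMaps over a large-enough range
lemma filterMap_even (xs : List Char) (c : ℕ) (h : xs.length ≤ 2 * c) :
    (List.range c).filterMap (fun k => xs[2 * k]?) = ev xs := by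
  induction xs using swpass.induct generalizing c with
  | case1 a b r ih =>
    match c with
    | c' + 1 =>
      rw [List.range_succ_eq_map, List.filterMap_cons]
      simp only [Nat.mul_zero, List.getElem?_cons_zero, List.filterMap_map]
      rw [show ((fun k => (a :: b :: r)[2 * k]?) ∘ Nat.succ) = (fun k => r[2 * k]?) by
        funext k
        simp [show 2 * Nat.succ k = 2 * k + 1 + 1 by omega]]
      rw [ih c' (by simp only [List.length_cons] at h ⊢; omega)]
      rfl
  | case2 l hl =>
    cases l with
    | nil => simp [ev, List.filterMap_eq_nil_iff]
    | cons a r =>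
      cases r with
      | nil =>
        match c with
        | c' + 1 =>
          rw [List.range_succ_eq_map, List.filterMap_cons]
          simp only [Nat.mul_zero, List.getElem?_cons_zero, List.filterMap_map]
          have hnil : List.filterMap ((fun k => ([a] : List Char)[2 * k]?) ∘ Nat.succ)
              (List.range c') = [] := by
            rw [List.filterMap_eq_nil_iff]
            intro k _
            simp only [Function.comp_apply, List.getElem?_eq_none_iff, List.length_cons,
              List.length_nil]
            omega
          rw [hnil]
          rfl
      | cons b r' => exact absurd rfl (hl a b r')

lemma filterMap_odd (xs : List Char) (c : ℕ) (h : xs.length ≤ 2 * c + 1) :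
    (List.range c).filterMap (fun k => xs[2 * k + 1]?) = od xs := by
  induction xs using swpass.induct generalizing c with
  | case1 a b r ih =>
    match c with
    | c' + 1 =>
      rw [List.range_succ_eq_map, List.filterMap_cons]
      simp only [Nat.mul_zero, Nat.zero_add, List.getElem?_cons_succ, List.getElem?_cons_zero,
        List.filterMap_map]
      rw [show ((fun x => (b :: r)[2 * x]?) ∘ Nat.succ) = (fun k => r[2 * k + 1]?) by
        funext k
        simp [show 2 * Nat.succ k = 2 * k + 1 + 1 by omega]]
      rw [ih c' (by simp only [List.length_cons] at h ⊢; omega)]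
      rw [show od (a :: b :: r) = b :: od r by simp [od, ev_cons]]
  | case2 l hl =>
    cases l with
    | nil => simp [od, ev, List.filterMap_eq_nil_iff]
    | cons a r =>
      cases r with
      | nil =>
        have : ∀ k : ℕ, ([a] : List Char)[2 * k + 1]? = none := by
          intro k
          simp only [List.getElem?_eq_none_iff, List.length_cons, List.length_nil]
          omega
        simp [od, ev, List.filterMap_eq_nil_iff, this]
      | cons b r' => exact absurd rfl (hl a b r')

lemma slice_even (xs : List Char) :
    (PySem.List.slice? xs (some 0) none 2).getD [] = ev xs := by
  simp only [PySem.List.slice?, PySem.List.sliceIndices]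
  norm_num
  rw [show (fun x : ℕ => xs[((2 : Int) * (x : Int)).toNat]?) = (fun k => xs[2 * k]?) by
    funext k
    rw [show ((2 : Int) * (k : Int)).toNat = 2 * k by omega]]
  apply filterMap_even
  split_ifs with h1
  all_goals omega

lemma slice_odd (xs : List Char) :
    (PySem.List.slice? xs (some 1) none 2).getD [] = od xs := by
  cases xs with
  | nil => rfl
  | cons a r =>
    simp only [PySem.List.slice?, PySem.List.sliceIndices]
    norm_num
    rw [show (fun x : ℕ => (a :: r)[((1 : Int) + 2 * (x : Int)).toNat]?) =
        (fun k => (a :: r)[2 * k + 1]?) by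
      funext k
      rw [show ((1 : Int) + 2 * (k : Int)).toNat = 2 * k + 1 by omega]]
    apply filterMap_odd
    split_ifs with h1
    all_goals simp only [List.length_cons]
    all_goals omega

-- ===== VERDICT (by name: the statement is the Claim_ definition above) =====
theorem randomizer_spec : Claim_equal_randomizer := by
  intro text _
  unfold Spec_randomizer randomizer randomizer_alt
  simp only
  rw [foldl_const_iterate outerStep (text.toList, (text.toList.length : Int), 1)]
  have hk : (PySem.List.pyRange 0 (text.toList.length : Int) 1).length = text.toList.length := by
    rw [PySem.List.length_pyRange_one]; simp
  have h0 := iterate_seg text.toList.length text.toList [] []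
  simp only [List.nil_append, List.append_nil, List.length_nil, Nat.cast_zero, zero_add] at h0
  rw [hk, h0, rounds_eq _ _ (le_refl _), slice_even, slice_odd]
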